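-- pv_equiv track=rewrite | github.com/alikohan/gridworld-genetic-algorithm | main.py | find_crossover_points
-- ===== SOURCE A (Python) =====
-- def find_crossover_points(location_individual1, location_individual2):
--     crossover_points = []
--     for i in range(len(location_individual1)):
--         crossover_points.append([])
--         for j in range(len(location_individual2)):
--             if location_individual1[i] == location_individual2[j]:
--                 crossover_points[-1].append(j)
--     return crossover_points
-- ===== SOURCE B (Python) =====
-- def find_crossover_points(location_individual1, location_individual2):
--     index = {}
--     for j, v in enumerate(location_individual2):
--         index.setdefault(v, []).append(j)
--     return [list(index.get(x, [])) for x in location_individual1]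
-- ===== Notes on version B (the rewrite author's own statement) =====
-- stated objective: alternative
-- what changed: Replaced the nested scan of list2 for every element of list1 by a single grouping pass that builds a dict value -> list of indices of list2, then one lookup per element of list1 (intended as the O(n+m)-work variant; a timing run measured 4.1x at n=4096 but could not confirm it at the largest size, where the quadratic-sized output dominates both).
import Mathlib
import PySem

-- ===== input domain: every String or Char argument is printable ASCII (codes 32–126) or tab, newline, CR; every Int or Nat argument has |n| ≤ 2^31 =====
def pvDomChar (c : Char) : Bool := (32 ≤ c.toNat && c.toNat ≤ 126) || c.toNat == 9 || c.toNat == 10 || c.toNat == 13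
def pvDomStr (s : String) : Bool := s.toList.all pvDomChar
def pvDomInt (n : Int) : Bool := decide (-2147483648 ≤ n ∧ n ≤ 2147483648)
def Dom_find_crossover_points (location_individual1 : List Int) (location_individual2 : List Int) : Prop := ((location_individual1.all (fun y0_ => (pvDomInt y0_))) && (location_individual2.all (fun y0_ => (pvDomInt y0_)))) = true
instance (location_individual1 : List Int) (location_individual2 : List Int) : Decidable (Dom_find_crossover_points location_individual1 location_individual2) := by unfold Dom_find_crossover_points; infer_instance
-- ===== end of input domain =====

-- B replaces A's nested scan of list2 per element of list1 by one grouping pass over list2 (dict value -> index list) plus a lookup per element of list1.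

-- ===== PORT A =====
def find_crossover_points (location_individual1 : List Int) (location_individual2 : List Int) : List (List Int) :=
  (PySem.List.pyRange 0 (location_individual1.length : Int) 1).foldl (fun cps i =>
    (PySem.List.pyRange 0 (location_individual2.length : Int) 1).foldl (fun cps j =>
      if PySem.List.pyGetD location_individual1 i 0 == PySem.List.pyGetD location_individual2 j 0 then
        cps.dropLast ++ [PySem.List.pyGetD cps (-1) [] ++ [j]]
      else cps) (cps ++ [[]])) []

-- ===== PORT B =====
def find_crossover_points_alt (location_individual1 : List Int) (location_individual2 : List Int) : List (List Int) :=
  let index : PySem.Dict Int (List Int) :=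
    (PySem.List.enumerate location_individual2).foldl
      (fun d p => d.modify p.2 ([] : List Int) (· ++ [p.1])) PySem.Dict.empty
  location_individual1.map (fun x => index.getD x [])

-- ===== PRECONDITION & SPEC =====
def Spec_find_crossover_points (location_individual1 : List Int) (location_individual2 : List Int) (out : List (List Int)) : Prop := out = find_crossover_points_alt location_individual1 location_individual2
instance (location_individual1 : List Int) (location_individual2 : List Int) (out : List (List Int)) : Decidable (Spec_find_crossover_points location_individual1 location_individual2 out) := by unfold Spec_find_crossover_points; infer_instance

-- ===== CLAIM (what is proved, stated in full; the proofs are below) =====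
def Claim_equal_find_crossover_points : Prop := ∀ (location_individual1 : List Int) (location_individual2 : List Int), Dom_find_crossover_points location_individual1 location_individual2 → Spec_find_crossover_points location_individual1 location_individual2 (find_crossover_points location_individual1 location_individual2)

-- ===== LEMMAS AND PROOFS =====

-- A's inner loop: appending j to the last row for each index passing P extends the last row by the filtered indices.
lemma pv_inner (P : Int → Bool) (js : List Int) (cps0 : List (List Int)) (row : List Int) :
    js.foldl (fun cps j => if P j then cps.dropLast ++ [PySem.List.pyGetD cps (-1) [] ++ [j]] else cps) (cps0 ++ [row])
      = cps0 ++ [row ++ js.filter P] := by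
  induction js generalizing row with
  | nil => simp
  | cons j js ih =>
    simp only [List.foldl_cons, List.filter_cons]
    by_cases h : P j
    · simp only [h, if_pos, PySem.List.pyGetD_neg_one_append_singleton, List.dropLast_concat, ih]
      simp
    · simp [h, ih]

-- A computes, for each element x of list1, the indices of list2 holding x.
lemma pv_A_eq_map (l1 l2 : List Int) :
    find_crossover_points l1 l2
      = l1.map (fun x => (PySem.List.pyRange 0 (l2.length : Int) 1).filter (fun j => x == PySem.List.pyGetD l2 j 0)) := by
  unfold find_crossover_points
  have hstep : (fun (cps : List (List Int)) (i : Int) =>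
      (PySem.List.pyRange 0 (l2.length : Int) 1).foldl (fun cps j =>
        if PySem.List.pyGetD l1 i 0 == PySem.List.pyGetD l2 j 0 then
          cps.dropLast ++ [PySem.List.pyGetD cps (-1) [] ++ [j]]
        else cps) (cps ++ [[]]))
      = fun cps i => cps ++ [(fun x => (PySem.List.pyRange 0 (l2.length : Int) 1).filter
          (fun j => x == PySem.List.pyGetD l2 j 0)) (PySem.List.pyGetD l1 i 0)] := by
    funext cps i
    simpa using pv_inner (fun j => PySem.List.pyGetD l1 i 0 == PySem.List.pyGetD l2 j 0) _ cps []
  rw [hstep, PySem.List.foldl_append_singleton_eq_map, List.nil_append]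
  conv_rhs => rw [← PySem.List.map_pyGetD_pyRange_zero' l1 0]
  rw [List.map_map]
  rfl

-- B's grouped dict lookup yields the enumerate-filter of list2 at each key.
lemma pv_B_eq_map (l1 l2 : List Int) :
    find_crossover_points_alt l1 l2
      = l1.map (fun x => ((PySem.List.enumerate l2 0).filter (fun p => p.2 == x)).map (·.1)) := by
  unfold find_crossover_points_alt
  refine List.map_congr_left fun x _ => ?_
  have hfold : ((PySem.List.enumerate l2 0).map (fun p : Int × Int => (p.2, p.1))).foldl
      (fun (d : PySem.Dict Int (List Int)) q => d.modify q.1 ([] : List Int) (· ++ [q.2])) PySem.Dict.empty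
      = (PySem.List.enumerate l2 0).foldl (fun d p => d.modify p.2 ([] : List Int) (· ++ [p.1])) PySem.Dict.empty := by
    rw [List.foldl_map]
  rw [← hfold, PySem.Dict.getD_foldl_modify_append, List.filter_map]
  simp [List.map_map, Function.comp_def]

-- the two per-element index rows coincide (start index s generalized for the induction)
lemma pv_gen (x : Int) (l : List Int) (s : Int) :
    ((PySem.List.enumerate l s).filter (fun p => p.2 == x)).map (·.1)
      = ((List.range l.length).filter (fun k => x == l.getD k 0)).map (fun (k : Nat) => s + (k : Int)) := by
  induction l generalizing s with
  | nil => simp [PySem.List.enumerate_nil]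
  | cons a l ih =>
    rw [PySem.List.enumerate_cons, List.length_cons, List.range_succ_eq_map,
        List.filter_cons, List.filter_cons, List.filter_map]
    have hsucc : ((fun k => x == (a :: l).getD k 0) ∘ Nat.succ) = fun k => x == l.getD k 0 := by
      funext k; simp
    rw [hsucc]
    have htail : ((List.range l.length).filter (fun k => x == l.getD k 0)).map
          ((fun (k : Nat) => s + (k : Int)) ∘ Nat.succ)
        = ((List.range l.length).filter (fun k => x == l.getD k 0)).map (fun (k : Nat) => (s + 1) + (k : Int)) := by
      refine List.map_congr_left fun k _ => ?_
      simp [Function.comp]; ring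
    by_cases h : a = x
    · subst h
      simp only [beq_self_eq_true, if_pos, List.getD_cons_zero, List.map_cons, List.map_map, ih,
        htail, Nat.cast_zero, add_zero]
    · have h1 : (a == x) = false := by simp [h]
      have h2 : (x == a) = false := by simp [Ne.symm h]
      simp only [h1, List.getD_cons_zero, h2, Bool.false_eq_true, if_false, List.map_map, ih, htail]

-- A's row for x equals B's row for x.
lemma pv_rows_eq (x : Int) (l : List Int) :
    (PySem.List.pyRange 0 (l.length : Int) 1).filter (fun j => x == PySem.List.pyGetD l j 0)
      = ((PySem.List.enumerate l 0).filter (fun p => p.2 == x)).map (·.1) := by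
  rw [pv_gen x l 0, PySem.List.pyRange_zero_nat, List.filter_map]
  have hc : ((fun j => x == PySem.List.pyGetD l j 0) ∘ fun (k : Nat) => (k : Int))
      = fun (k : Nat) => x == l.getD k 0 := by funext k; simp
  rw [hc]
  exact List.map_congr_left fun k _ => by simp

-- ===== VERDICT (by name: the statement is the Claim_ definition above) =====
theorem find_crossover_points_spec : Claim_equal_find_crossover_points := by
  intro l1 l2 _
  unfold Spec_find_crossover_points
  rw [pv_A_eq_map, pv_B_eq_map]
  exact List.map_congr_left fun x _ => pv_rows_eq x l2
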